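-- pv_equiv track=rewrite | github.com/wguDataNinja/WGU-Reddit-Feedback-Analyzer | WGU_catalog/lib/snapshot_utils.py | pick_snapshot
-- ===== SOURCE A (Python) =====
-- def pick_snapshot(date_str: str, snapshots: dict) -> list:
--     """
--     Given a catalog date (YYYY-MM) and a dict of snapshots keyed by version,
--     return the snapshot list for the greatest version <= date_str.
--     """
--     versions = sorted(snapshots.keys())
--     chosen = None
--     for version in versions:
--         if version <= date_str:
--             chosen = version
--     if chosen is None:
--         raise ValueError(f"[FAIL] No snapshot version found for {date_str}")
--     return snapshots[chosen]
-- ===== SOURCE B (Python) =====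
-- def pick_snapshot(date_str: str, snapshots: dict) -> list:
--     """
--     Given a catalog date (YYYY-MM) and a dict of snapshots keyed by version,
--     return the snapshot list for the greatest version <= date_str.
--     """
--     eligible = [version for version in snapshots if version <= date_str]
--     if not eligible:
--         raise ValueError(f"[FAIL] No snapshot version found for {date_str}")
--     return snapshots[max(eligible)]
-- ===== Notes on version B (the rewrite author's own statement) =====
-- stated objective: simpler
-- what changed: B drops A's sort-then-linear-scan entirely: it filters the keys to those <= date_str and takes max() of the eligible ones (no sort), raising the same ValueError when none qualify.
import Mathlib
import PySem

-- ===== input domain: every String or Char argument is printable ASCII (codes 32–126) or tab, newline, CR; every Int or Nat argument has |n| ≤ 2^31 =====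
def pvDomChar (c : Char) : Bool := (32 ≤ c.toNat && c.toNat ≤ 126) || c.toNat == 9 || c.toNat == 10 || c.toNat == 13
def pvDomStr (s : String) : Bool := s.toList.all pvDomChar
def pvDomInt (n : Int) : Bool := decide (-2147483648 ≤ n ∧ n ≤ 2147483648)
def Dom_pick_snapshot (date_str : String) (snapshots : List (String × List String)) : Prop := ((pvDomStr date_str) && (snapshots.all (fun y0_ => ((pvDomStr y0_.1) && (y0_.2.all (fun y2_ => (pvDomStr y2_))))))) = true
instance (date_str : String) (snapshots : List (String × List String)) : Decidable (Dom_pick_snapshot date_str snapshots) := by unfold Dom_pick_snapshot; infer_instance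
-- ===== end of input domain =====

-- B replaces A's sort-then-linear-scan by a direct filter + max over the keys (no sort): simpler.


-- ===== PORT A =====
def pick_snapshot (date_str : String) (snapshots : List (String × List String)) : List String :=
  let snaps := PySem.Dict.ofList snapshots
  let versions := PySem.List.sorted snaps.keys (fun x => x) false
  let chosen := versions.foldl
    (fun chosen version => if version ≤ date_str then some version else chosen)
    (none : Option String)
  match chosen with
  | none => []          -- Python raises ValueError here; excluded by Pre_pick_snapshot
  | some c => snaps.getD c []   -- c is a key of snaps, so the dict lookup cannot raise

-- ===== PORT B =====
def pick_snapshot_alt (date_str : String) (snapshots : List (String × List String)) : List String :=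
  let snaps := PySem.Dict.ofList snapshots
  let eligible := snaps.keys.filter (fun version => decide (version ≤ date_str))
  match PySem.List.max? eligible (fun x => x) with
  | none => []          -- Python raises ValueError here; excluded by Pre_pick_snapshot
  | some m => snaps.getD m []   -- m is a key of snaps, so the dict lookup cannot raise

-- ===== PRECONDITION & SPEC =====
-- Pre_ excludes exactly the inputs with no key ≤ date_str, on which BOTH Pythons raise ValueError.
-- (stated via toList: s ≤ t on String ↔ s.toList ≤ t.toList — String.le_iff_toList_le — and the list form is kernel-decidable)
def Pre_pick_snapshot (date_str : String) (snapshots : List (String × List String)) : Prop :=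
  snapshots.any (fun p => decide (p.1.toList ≤ date_str.toList)) = true
instance (date_str : String) (snapshots : List (String × List String)) : Decidable (Pre_pick_snapshot date_str snapshots) := by unfold Pre_pick_snapshot; infer_instance
def pvWitness_pick_snapshot : String × (List (String × List String)) :=
  ("2020-01", [("2019-12", ["a"]), ("2020-06", ["b"])])

def Spec_pick_snapshot (date_str : String) (snapshots : List (String × List String)) (out : List String) : Prop := out = pick_snapshot_alt date_str snapshots
instance (date_str : String) (snapshots : List (String × List String)) (out : List String) : Decidable (Spec_pick_snapshot date_str snapshots out) := by unfold Spec_pick_snapshot; infer_instance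

-- ===== CLAIM (what is proved, stated in full; the proofs are below) =====
def Claim_equal_pick_snapshot : Prop := ∀ (date_str : String) (snapshots : List (String × List String)), Dom_pick_snapshot date_str snapshots → Pre_pick_snapshot date_str snapshots → Spec_pick_snapshot date_str snapshots (pick_snapshot date_str snapshots)

-- ===== LEMMAS AND PROOFS =====

-- A's scan keeps the LAST eligible element: the foldl is getLast? of the filtered list.
theorem foldl_last_filter {α : Type} (p : α → Bool) (xs : List α) (init : Option α) :
    xs.foldl (fun ch v => if p v then some v else ch) init
      = ((xs.filter p).getLast?).or init := by
  induction xs generalizing init with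
  | nil => simp
  | cons x xs ih =>
    simp only [List.foldl_cons, List.filter_cons]
    by_cases h : p x
    · simp only [h, if_pos, ih, List.getLast?_cons]
      cases hl : (xs.filter p).getLast? <;> simp
    · simp [h, ih]

-- in a ≤-pairwise list every element is ≤ the last one
theorem le_getLast_of_pairwise {l : List String} (hp : l.Pairwise (· ≤ ·))
    {y : String} (hy : y ∈ l) : ∀ {x : String}, l.getLast? = some x → y ≤ x := by
  induction l with
  | nil => cases hy
  | cons a t ih =>
    intro x hx
    rw [List.getLast?_cons] at hx
    cases ht : t.getLast? with
    | none =>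
      have : t = [] := List.getLast?_eq_none_iff.mp ht
      subst this
      simp at hx hy; simp [hy, hx]
    | some b =>
      rw [ht] at hx; simp at hx; subst hx
      rcases List.mem_cons.mp hy with rfl | hyt
      · exact List.rel_of_pairwise_cons hp (List.mem_of_getLast? ht)
      · exact ih hp.of_cons hyt ht

theorem pick_eq (date_str : String) (snapshots : List (String × List String)) :
    pick_snapshot date_str snapshots = pick_snapshot_alt date_str snapshots := by
  unfold pick_snapshot pick_snapshot_alt
  dsimp only
  have hfold : ∀ (xs : List String),
      xs.foldl (fun chosen version => if version ≤ date_str then some version else chosen)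
          (none : Option String)
        = ((xs.filter (fun v => decide (v ≤ date_str))).getLast?).or none := by
    intro xs
    rw [← foldl_last_filter]
    congr 1
    funext ch v
    by_cases h : v ≤ date_str <;> simp [h]
  set snaps := PySem.Dict.ofList snapshots with hsnaps
  set p : String → Bool := fun v => decide (v ≤ date_str) with hp
  set S := PySem.List.sorted snaps.keys (fun x => x) false with hS
  have hperm : (S.filter p).Perm (snaps.keys.filter p) :=
    (PySem.List.sorted_perm snaps.keys (fun x => x) false).filter p
  have hpw : (S.filter p).Pairwise (· ≤ ·) :=
    (PySem.List.sorted_pairwise snaps.keys (fun x => x)).filter p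
  cases hL : (S.filter p).getLast? with
  | none =>
    have hnil : S.filter p = [] := List.getLast?_eq_none_iff.mp hL
    have hMnil : snaps.keys.filter p = [] := (hnil ▸ hperm : ([] : List String).Perm _).symm.eq_nil
    rw [hfold S, hL, hMnil, (PySem.List.max?_eq_none_iff ([] : List String) (fun x => x)).mpr rfl]
    rfl
  | some c =>
    have hcL : c ∈ S.filter p := List.mem_of_getLast? hL
    have hMne : snaps.keys.filter p ≠ [] := by
      intro h; rw [h] at hperm; simpa using hperm.mem_iff.mp hcL
    cases hM : PySem.List.max? (snaps.keys.filter p) (fun x => x) with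
    | none => exact absurd ((PySem.List.max?_eq_none_iff _ _).mp hM) hMne
    | some m =>
      have hmM : m ∈ snaps.keys.filter p := PySem.List.max?_mem hM
      have hcm : c ≤ m := PySem.List.max?_isMax hM c (hperm.mem_iff.mp hcL)
      have hmc : m ≤ c := le_getLast_of_pairwise hpw (hperm.mem_iff.mpr hmM) hL
      rw [hfold S, hL, le_antisymm hcm hmc]
      rfl

-- ===== VERDICT (by name: the statement is the Claim_ definition above) =====
theorem pick_snapshot_spec : Claim_equal_pick_snapshot := by
  intro d s _ _
  unfold Spec_pick_snapshot
  exact pick_eq d s
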